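-- pv_equiv track=rewrite | github.com/fernandovmedina/logic-exercises | integer_to_roman.py | convertUnitToLetter
-- ===== SOURCE A (Python) =====
-- def convertUnitToLetter(p: int, u: int) -> str:
--   r: str = ""
--   match p:
--     case 100:
--       if u <= 3:
--         for i in range(u):
--           r += "C"
--       match u:
--         case 4:
--           r += "CD"
--         case 5:
--           r += "D"
--         case 6:
--           r += "DC"
--         case 7:
--           r += "DCC"
--         case 8:
--           r += "DCCC"
--         case 9:
--           r += "CM"
--     case 10:
--       if u <= 3:
--         for i in range(u):
--           r += "X"
--       match u:
--         case 4:
--           r += "LX"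
--         case 5:
--           r += "L"
--         case 6:
--           r += "LX"
--         case 7:
--           r += "LXX"
--         case 8:
--           r += "LXXX"
--         case 9:
--           r += "XC"
--     case 1:
--       if u <= 3:
--         for i in range(u):
--           r += "I"
--       match u:
--         case 4:
--           r += "IV"
--         case 5:
--           r += "V"
--         case 6:
--           r += "VI"
--         case 7:
--           r += "VII"
--         case 8:
--           r += "VIII"
--         case 9:
--           r += "IX"
--   return r
-- ===== SOURCE B (Python) =====
-- def convertUnitToLetter(p: int, u: int) -> str:
--     sym = {1: ("I", "V", "X"), 10: ("X", "L", "C"), 100: ("C", "D", "M")}.get(p)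
--     if sym is None or u < 1 or u > 9:
--         return ""
--     one, five, ten = sym
--     if u <= 3:
--         return one * u
--     if u == 4:
--         return one + five
--     if u <= 8:
--         return five + one * (u - 5)
--     return one + ten
-- ===== Notes on version B (the rewrite author's own statement) =====
-- stated objective: simpler
-- what changed: B replaces A's three copy-pasted match/loop cascades by one generic Roman-digit construction (one/five/ten symbol triple per place plus the standard 1-3/4/5-8/9 rule), fixing the tens copy-paste slip at u=4.
-- intended difference: On p=10, u=4 A returns 'LX' (a copy-paste of the u=6 case, so 40 and 60 both render as 'LX'); B returns the correct Roman numeral 'XL', which is the intended value. — e.g. on convertUnitToLetter(10, 4): A returns "LX", B returns "XL"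
import Mathlib
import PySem

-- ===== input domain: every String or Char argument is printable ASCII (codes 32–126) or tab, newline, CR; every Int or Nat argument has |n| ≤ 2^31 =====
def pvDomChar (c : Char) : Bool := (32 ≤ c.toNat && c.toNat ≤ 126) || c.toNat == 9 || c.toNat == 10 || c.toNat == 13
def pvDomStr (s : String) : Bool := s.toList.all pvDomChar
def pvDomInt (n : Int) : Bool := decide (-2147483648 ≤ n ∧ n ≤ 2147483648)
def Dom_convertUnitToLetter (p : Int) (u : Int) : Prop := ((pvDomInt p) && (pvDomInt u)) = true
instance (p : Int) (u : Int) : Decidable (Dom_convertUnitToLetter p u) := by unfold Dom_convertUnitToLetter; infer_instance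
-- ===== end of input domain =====

-- B replaces A's three copy-pasted match/loop cascades by one generic Roman-digit rule
-- (symbol triple per place + 1-3/4/5-8/9 construction); it differs from A only at (p,u)=(10,4), see D_ below.

-- ===== PORT A =====
-- literal transliteration: Python's `match` on int literals is an equality chain; `for i in range(u): r += c`
-- is a foldl over PySem.List.pyRange 0 u 1.
def convertUnitToLetter (p : Int) (u : Int) : String :=
  let r : String := ""
  if p = 100 then
    let r := if u ≤ 3 then (PySem.List.pyRange 0 u 1).foldl (fun r _ => r ++ "C") r else r
    if u = 4 then r ++ "CD" else if u = 5 then r ++ "D" else if u = 6 then r ++ "DC"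
    else if u = 7 then r ++ "DCC" else if u = 8 then r ++ "DCCC" else if u = 9 then r ++ "CM" else r
  else if p = 10 then
    let r := if u ≤ 3 then (PySem.List.pyRange 0 u 1).foldl (fun r _ => r ++ "X") r else r
    if u = 4 then r ++ "LX" else if u = 5 then r ++ "L" else if u = 6 then r ++ "LX"
    else if u = 7 then r ++ "LXX" else if u = 8 then r ++ "LXXX" else if u = 9 then r ++ "XC" else r
  else if p = 1 then
    let r := if u ≤ 3 then (PySem.List.pyRange 0 u 1).foldl (fun r _ => r ++ "I") r else r
    if u = 4 then r ++ "IV" else if u = 5 then r ++ "V" else if u = 6 then r ++ "VI"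
    else if u = 7 then r ++ "VII" else if u = 8 then r ++ "VIII" else if u = 9 then r ++ "IX" else r
  else r

-- ===== PORT B =====
-- Python string repetition `s * n` (n ≥ 0 here)
def pvRep (s : String) : Nat → String
  | 0 => ""
  | n + 1 => s ++ pvRep s n

def convertUnitToLetter_alt (p : Int) (u : Int) : String :=
  match (if p = 1 then some ("I", "V", "X")
         else if p = 10 then some ("X", "L", "C")
         else if p = 100 then some ("C", "D", "M")
         else none) with
  | none => ""
  | some (one, five, ten) =>
    if u < 1 ∨ u > 9 then ""
    else if u ≤ 3 then pvRep one u.toNat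
    else if u = 4 then one ++ five
    else if u ≤ 8 then five ++ pvRep one (u - 5).toNat
    else one ++ ten

-- ===== PRECONDITION & SPEC =====
-- On p=10, u=4 A returns "LX" (a copy-paste of the u=6 case, so 40 and 60 both render as "LX");
-- B returns the correct Roman numeral "XL", which is the intended value.
def D_convertUnitToLetter (p : Int) (u : Int) : Prop := p = 10 ∧ u = 4
instance (p : Int) (u : Int) : Decidable (D_convertUnitToLetter p u) := by unfold D_convertUnitToLetter; infer_instance

def Spec_convertUnitToLetter (p : Int) (u : Int) (out : String) : Prop := ¬ D_convertUnitToLetter p u → out = convertUnitToLetter_alt p u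
instance (p : Int) (u : Int) (out : String) : Decidable (Spec_convertUnitToLetter p u out) := by unfold Spec_convertUnitToLetter; infer_instance

def pvDiffWitness_convertUnitToLetter : Int × Int := (10, 4)
def pvDiffWitnessOut_convertUnitToLetter : String × String := ("LX", "XL")

-- ===== CLAIM (what is proved, stated in full; the proofs are below) =====
def Claim_unchanged_convertUnitToLetter : Prop := ∀ (p : Int) (u : Int), Dom_convertUnitToLetter p u → Spec_convertUnitToLetter p u (convertUnitToLetter p u)
def Claim_changed_convertUnitToLetter : Prop := Dom_convertUnitToLetter (pvDiffWitness_convertUnitToLetter.1) (pvDiffWitness_convertUnitToLetter.2) ∧ D_convertUnitToLetter (pvDiffWitness_convertUnitToLetter.1) (pvDiffWitness_convertUnitToLetter.2) ∧ convertUnitToLetter (pvDiffWitness_convertUnitToLetter.1) (pvDiffWitness_convertUnitToLetter.2) = pvDiffWitnessOut_convertUnitToLetter.1 ∧ convertUnitToLetter_alt (pvDiffWitness_convertUnitToLetter.1) (pvDiffWitness_convertUnitToLetter.2) = pvDiffWitnessOut_convertUnitToLetter.2 ∧ pvDiffWitnessOut_convertUnitToLetter.1 ≠ pvDiffWitnessO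ut_convertUnitToLetter.2
def Claim_exact_convertUnitToLetter : Prop := ∀ (p : Int) (u : Int), Dom_convertUnitToLetter p u → D_convertUnitToLetter p u → convertUnitToLetter p u ≠ convertUnitToLetter_alt p u

-- ===== LEMMAS AND PROOFS =====
lemma pyRange_nonpos (u : Int) (h : u ≤ 0) : PySem.List.pyRange 0 u 1 = [] := by
  rw [PySem.List.pyRange_one]
  simp
  omega

set_option maxHeartbeats 2000000 in
lemma equiv_low (p : Int) (u : Int) (h : u ≤ 0) :
    convertUnitToLetter p u = convertUnitToLetter_alt p u := by
  simp only [convertUnitToLetter, convertUnitToLetter_alt, pyRange_nonpos u h, List.foldl]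
  split_ifs <;> first | omega | rfl

set_option maxHeartbeats 2000000 in
lemma equiv_high (p : Int) (u : Int) (h : 10 ≤ u) :
    convertUnitToLetter p u = convertUnitToLetter_alt p u := by
  simp only [convertUnitToLetter, convertUnitToLetter_alt]
  split_ifs <;> first | omega | rfl

lemma equiv_other (p : Int) (u : Int) (h100 : ¬ p = 100) (h10 : ¬ p = 10) (h1 : ¬ p = 1) :
    convertUnitToLetter p u = convertUnitToLetter_alt p u := by
  simp [convertUnitToLetter, convertUnitToLetter_alt, h100, h10, h1]

lemma equiv_at (p : Int) (u : Int) (hnd : ¬ D_convertUnitToLetter p u) :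
    convertUnitToLetter p u = convertUnitToLetter_alt p u := by
  have hcases : u ≤ 0 ∨ u = 1 ∨ u = 2 ∨ u = 3 ∨ u = 4 ∨ u = 5 ∨ u = 6 ∨ u = 7 ∨ u = 8 ∨ u = 9 ∨ 10 ≤ u := by omega
  rcases hcases with h | h | h | h | h | h | h | h | h | h | h
  · exact equiv_low p u h
  · -- u = 1
    subst h
    by_cases h100 : p = 100
    · subst h100; decide
    · by_cases h10 : p = 10
      · subst h10; decide
      · by_cases h1 : p = 1
        · subst h1; decide
        · exact equiv_other p _ h100 h10 h1
  · -- u = 2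
    subst h
    by_cases h100 : p = 100
    · subst h100; decide
    · by_cases h10 : p = 10
      · subst h10; decide
      · by_cases h1 : p = 1
        · subst h1; decide
        · exact equiv_other p _ h100 h10 h1
  · -- u = 3
    subst h
    by_cases h100 : p = 100
    · subst h100; decide
    · by_cases h10 : p = 10
      · subst h10; decide
      · by_cases h1 : p = 1
        · subst h1; decide
        · exact equiv_other p _ h100 h10 h1
  · -- u = 4
    subst h
    by_cases h100 : p = 100
    · subst h100; decide
    · by_cases h10 : p = 10
      · -- (p, u) = (10, 4): excluded by D_
        exact absurd ⟨h10, rfl⟩ hnd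
      · by_cases h1 : p = 1
        · subst h1; decide
        · exact equiv_other p _ h100 h10 h1
  · -- u = 5
    subst h
    by_cases h100 : p = 100
    · subst h100; decide
    · by_cases h10 : p = 10
      · subst h10; decide
      · by_cases h1 : p = 1
        · subst h1; decide
        · exact equiv_other p _ h100 h10 h1
  · -- u = 6
    subst h
    by_cases h100 : p = 100
    · subst h100; decide
    · by_cases h10 : p = 10
      · subst h10; decide
      · by_cases h1 : p = 1
        · subst h1; decide
        · exact equiv_other p _ h100 h10 h1
  · -- u = 7
    subst h
    by_cases h100 : p = 100
    · subst h100; decide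
    · by_cases h10 : p = 10
      · subst h10; decide
      · by_cases h1 : p = 1
        · subst h1; decide
        · exact equiv_other p _ h100 h10 h1
  · -- u = 8
    subst h
    by_cases h100 : p = 100
    · subst h100; decide
    · by_cases h10 : p = 10
      · subst h10; decide
      · by_cases h1 : p = 1
        · subst h1; decide
        · exact equiv_other p _ h100 h10 h1
  · -- u = 9
    subst h
    by_cases h100 : p = 100
    · subst h100; decide
    · by_cases h10 : p = 10
      · subst h10; decide
      · by_cases h1 : p = 1
        · subst h1; decide
        · exact equiv_other p _ h100 h10 h1
  · exact equiv_high p u h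

-- ===== VERDICT (by name: the statement is the Claim_ definition above) =====
theorem convertUnitToLetter_spec : Claim_unchanged_convertUnitToLetter := by
  intro p u _ hnd
  exact equiv_at p u hnd

theorem convertUnitToLetter_changed : Claim_changed_convertUnitToLetter := by
  unfold Claim_changed_convertUnitToLetter; decide

theorem convertUnitToLetter_tight : Claim_exact_convertUnitToLetter := by
  intro p u _ hd
  obtain ⟨hp, hu⟩ := hd
  subst hp; subst hu
  decide
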